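-- pv_equiv track=rewrite | github.com/frankeee/ExactasPrograma | Mazo.py | jugar
-- ===== SOURCE A (Python) =====
-- def jugar(m):
--     j = 0
--     while j < 21:
--         if len(m) == 0:
--             return j
--         else :
--             j += m.pop(0)
--     return j
-- ===== SOURCE B (Python) =====
-- def jugar(m):
--     # Build the prefix sums first, then search for the first one reaching 21,
--     # then bulk-delete the consumed prefix (same mutation of m as A).
--     total = 0
--     sums = []
--     for x in m:
--         total += x
--         sums.append(total)
--     for i, s in enumerate(sums):
--         if s >= 21:
--             del m[:i+1]
--             return s
--     del m[:]
--     return total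
-- ===== Notes on version B (the rewrite author's own statement) =====
-- stated objective: alternative
-- what changed: Replaces the incremental pop-and-test while loop with a build-prefix-sums, search-first-hit, then bulk-slice-delete decomposition (same mutation of m).
import Mathlib
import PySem

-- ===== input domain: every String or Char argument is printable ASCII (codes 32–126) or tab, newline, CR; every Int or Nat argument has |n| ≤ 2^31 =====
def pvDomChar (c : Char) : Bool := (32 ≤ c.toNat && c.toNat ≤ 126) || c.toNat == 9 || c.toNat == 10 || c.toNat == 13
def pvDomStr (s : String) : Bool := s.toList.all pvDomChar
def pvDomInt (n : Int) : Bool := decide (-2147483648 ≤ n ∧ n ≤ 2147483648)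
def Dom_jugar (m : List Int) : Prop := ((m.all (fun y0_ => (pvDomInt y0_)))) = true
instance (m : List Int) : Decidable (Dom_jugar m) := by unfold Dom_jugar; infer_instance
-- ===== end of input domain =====

-- B replaces A's incremental pop-and-test loop by building the prefix sums, searching the
-- first one ≥ 21, and bulk-deleting the consumed prefix; equivalence here is about the
-- RETURN value only (both Pythons mutate m identically: they remove exactly the consumed prefix).

-- ===== PORT A =====
-- while j < 21: if empty return j else j += m.pop(0); return j
def jugarGo (j : Int) (m : List Int) : Int :=
  if 21 ≤ j then j
  else
    match m with
    | [] => j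
    | x :: xs => jugarGo (j + x) xs

def jugar (m : List Int) : Int := jugarGo 0 m

-- ===== PORT B =====
-- first loop of Source B: running total and the list of prefix sums
def jugarAltSums (m : List Int) : Int × List Int :=
  m.foldl (fun (acc : Int × List Int) x => (acc.1 + x, acc.2 ++ [acc.1 + x])) (0, [])

def jugar_alt (m : List Int) : Int :=
  let p := jugarAltSums m
  -- second loop of Source B: first prefix sum reaching 21 (the index is only used for the deletion)
  match p.2.find? (fun s => 21 ≤ s) with
  | some s => s
  | none => p.1

-- ===== PRECONDITION & SPEC =====
def Spec_jugar (m : List Int) (out : Int) : Prop := out = jugar_alt m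
instance (m : List Int) (out : Int) : Decidable (Spec_jugar m out) := by unfold Spec_jugar; infer_instance

-- ===== CLAIM (what is proved, stated in full; the proofs are below) =====
def Claim_equal_jugar : Prop := ∀ (m : List Int), Dom_jugar m → Spec_jugar m (jugar m)

-- ===== LEMMAS AND PROOFS =====

-- prefix sums of m shifted by j, as Source B's first loop produces them
def psums (j : Int) : List Int → List Int
  | [] => []
  | x :: xs => (j + x) :: psums (j + x) xs

theorem jugarAltSums_go (m : List Int) (j : Int) (acc : List Int) :
    m.foldl (fun (a : Int × List Int) x => (a.1 + x, a.2 ++ [a.1 + x])) (j, acc)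
      = (j + m.sum, acc ++ psums j m) := by
  induction m generalizing j acc with
  | nil => simp [psums]
  | cons x xs ih =>
    simp only [List.foldl_cons, ih, psums, List.sum_cons]
    refine Prod.ext ?_ ?_
    · simp; ring
    · simp

theorem jugar_alt_eq (m : List Int) :
    jugar_alt m = match (psums 0 m).find? (fun s => 21 ≤ s) with
                  | some s => s
                  | none => m.sum := by
  simp [jugar_alt, jugarAltSums, jugarAltSums_go]

theorem jugarGo_eq (m : List Int) (j : Int) (hj : j < 21) :
    jugarGo j m = match (psums j m).find? (fun s => 21 ≤ s) with
                  | some s => s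
                  | none => j + m.sum := by
  induction m generalizing j with
  | nil =>
    simp [jugarGo, psums, not_le.mpr hj]
  | cons x xs ih =>
    rw [jugarGo.eq_def]
    rw [if_neg (not_le.mpr hj)]
    by_cases h : 21 ≤ j + x
    · have : jugarGo (j + x) xs = j + x := by rw [jugarGo.eq_def, if_pos h]
      simp [psums, decide_eq_true h, this]
    · have hlt : j + x < 21 := lt_of_not_ge h
      simp only [psums, List.find?, decide_eq_false h]
      rw [ih (j + x) hlt]
      cases (psums (j + x) xs).find? (fun s => 21 ≤ s) with
      | some s => rfl
      | none => simp; ring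

-- ===== VERDICT (by name: the statement is the Claim_ definition above) =====
theorem jugar_spec : Claim_equal_jugar := by
  intro m _
  unfold Spec_jugar jugar
  rw [jugar_alt_eq, jugarGo_eq m 0 (by norm_num)]
  cases (psums 0 m).find? (fun s => 21 ≤ s) with
  | some s => rfl
  | none => simp
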